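-- pv_equiv track=rewrite | github.com/yismaeel21/Basic-Python | homework3.py | is_strictly_dominant_second
-- ===== SOURCE A (Python) =====
-- def is_strictly_dominant_second(u2,s2):
--     player_two_strategy = u2[s2]
--     j = len(player_two_strategy)
--     for i in range(j-1):
--         for y in range(len(u2)):
--             if u2[s2][i]>u2[y][i+1]:
--                 return False
--     return True
-- ===== SOURCE B (Python) =====
-- def is_strictly_dominant_second(u2, s2):
--     row = u2[s2]
--     m = len(row)
--     # fold over the rows: elementwise minimum of each row's columns 1..m-1
--     acc = u2[0][1:m]
--     for r in u2[1:]: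
--         acc = [min(a, b) for a, b in zip(acc, r[1:m])]
--     return all(a <= b for a, b in zip(row, acc))
-- ===== Notes on version B (the rewrite author's own statement) =====
-- stated objective: alternative
-- what changed: Replaces A's column-by-column double loop with early return by a single row-wise fold that accumulates the elementwise minimum of each row's columns 1..m-1 and then a final zip comparing the chosen row against that accumulated vector.
-- outside the precondition, e.g. on is_strictly_dominant_second([[5, 0], [3]], 0): A returns False, B returns True
import Mathlib
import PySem

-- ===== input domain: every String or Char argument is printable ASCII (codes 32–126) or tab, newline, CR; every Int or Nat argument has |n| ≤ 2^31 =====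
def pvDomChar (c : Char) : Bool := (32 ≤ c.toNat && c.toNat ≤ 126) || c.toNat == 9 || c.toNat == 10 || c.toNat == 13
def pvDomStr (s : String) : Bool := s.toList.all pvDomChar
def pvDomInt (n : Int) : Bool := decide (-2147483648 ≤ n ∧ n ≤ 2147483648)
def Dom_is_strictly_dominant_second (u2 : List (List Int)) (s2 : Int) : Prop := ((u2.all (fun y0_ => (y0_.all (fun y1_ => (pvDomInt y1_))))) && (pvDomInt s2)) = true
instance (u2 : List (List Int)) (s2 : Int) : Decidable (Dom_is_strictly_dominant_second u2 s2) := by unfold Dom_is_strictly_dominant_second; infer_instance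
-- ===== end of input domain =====

-- B replaces A's column-by-column double loop with a single row-wise fold accumulating the
-- elementwise minimum of each row's tail columns, then one zip comparison (same cost).

-- ===== PORT A =====
def is_strictly_dominant_second (u2 : List (List Int)) (s2 : Int) : Bool :=
  let player_two_strategy := PySem.List.pyGetD u2 s2 []
  let j : Int := player_two_strategy.length
  (PySem.List.pyRange 0 (j - 1) 1).all fun i =>
    (PySem.List.pyRange 0 (u2.length : Int) 1).all fun y =>
      !(decide (PySem.List.pyGetD (PySem.List.pyGetD u2 s2 []) i 0 >
                PySem.List.pyGetD (PySem.List.pyGetD u2 y []) (i + 1) 0))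

-- ===== PORT B =====
def is_strictly_dominant_second_alt (u2 : List (List Int)) (s2 : Int) : Bool :=
  let row := PySem.List.pyGetD u2 s2 []
  let m : Int := row.length
  let acc0 := PySem.List.slice (PySem.List.pyGetD u2 0 []) (some 1) (some m)
  let acc := (PySem.List.slice u2 (some 1) none).foldl
    (fun acc r => (acc.zip (PySem.List.slice r (some 1) (some m))).map fun p => min p.1 p.2) acc0
  (row.zip acc).all fun p => decide (p.1 ≤ p.2)

-- ===== PRECONDITION & SPEC =====
-- Pre_ excludes inputs where A raises IndexError (s2 out of range, or a row shorter than
-- row s2 reached by the column loop), and the ragged inputs with a row shorter than row s2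
-- on which A may return False before hitting the short row while B's truncating zip skips
-- the missing entries and may return True.
def Pre_is_strictly_dominant_second (u2 : List (List Int)) (s2 : Int) : Prop :=
  PySem.Raise.InRange u2.length s2 ∧
    ((PySem.List.pyGetD u2 s2 []).length ≤ 1 ∨
      ∀ r ∈ u2, (PySem.List.pyGetD u2 s2 []).length ≤ r.length)
instance (u2 : List (List Int)) (s2 : Int) : Decidable (Pre_is_strictly_dominant_second u2 s2) := by unfold Pre_is_strictly_dominant_second; infer_instance

def pvWitness_is_strictly_dominant_second : List (List Int) × Int := ([[1, 2], [3, 4]], 0)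

def Spec_is_strictly_dominant_second (u2 : List (List Int)) (s2 : Int) (out : Bool) : Prop := out = is_strictly_dominant_second_alt u2 s2
instance (u2 : List (List Int)) (s2 : Int) (out : Bool) : Decidable (Spec_is_strictly_dominant_second u2 s2 out) := by unfold Spec_is_strictly_dominant_second; infer_instance

-- ===== CLAIM =====
def Claim_equal_is_strictly_dominant_second : Prop := ∀ (u2 : List (List Int)) (s2 : Int), Dom_is_strictly_dominant_second u2 s2 → Pre_is_strictly_dominant_second u2 s2 → Spec_is_strictly_dominant_second u2 s2 (is_strictly_dominant_second u2 s2)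

-- ===== LEMMAS AND PROOFS =====

-- zip-then-map-min is zipWith min
lemma zip_map_min (a b : List Int) :
    (a.zip b).map (fun p => min p.1 p.2) = List.zipWith min a b := by
  induction a generalizing b with
  | nil => simp
  | cons x xs ih => cases b <;> simp [ih]

-- length is preserved by the fold when every folded row is at least as long
lemma foldl_zipWith_min_length (rs : List (List Int)) (acc : List Int)
    (h : ∀ r ∈ rs, acc.length ≤ r.length) :
    (rs.foldl (List.zipWith min) acc).length = acc.length := by
  induction rs generalizing acc with
  | nil => rfl
  | cons r rs ih =>
    have h1 : (List.zipWith min acc r).length = acc.length := by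
      rw [List.length_zipWith]; exact Nat.min_eq_left (h r (by simp))
    simp only [List.foldl_cons]
    rw [ih _ (by intro r' hr'; rw [h1]; exact h r' (by simp [hr']))]
    exact h1

-- pointwise value of the fold
lemma foldl_zipWith_min_getD (rs : List (List Int)) (acc : List Int) (k : ℕ)
    (h : ∀ r ∈ rs, acc.length ≤ r.length) (hk : k < acc.length) :
    (rs.foldl (List.zipWith min) acc).getD k 0 =
      rs.foldl (fun v r => min v (r.getD k 0)) (acc.getD k 0) := by
  induction rs generalizing acc with
  | nil => rfl
  | cons r rs ih =>
    have hlen : (List.zipWith min acc r).length = acc.length := by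
      rw [List.length_zipWith]; exact Nat.min_eq_left (h r (by simp))
    have hget : (List.zipWith min acc r).getD k 0 = min (acc.getD k 0) (r.getD k 0) := by
      have hkr : k < r.length := lt_of_lt_of_le hk (h r (by simp))
      rw [List.getD_eq_getElem _ _ (by omega : k < (List.zipWith min acc r).length),
        List.getElem_zipWith, List.getD_eq_getElem _ _ hk, List.getD_eq_getElem _ _ hkr]
    simp only [List.foldl_cons]
    rw [ih _ (by intro r' hr'; rw [hlen]; exact h r' (by simp [hr'])) (by omega), hget]

-- comparison against a fold of minima
lemma le_foldl_min (l : List (List Int)) (g : List Int → Int) (b a : Int) :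
    a ≤ l.foldl (fun v r => min v (g r)) b ↔ a ≤ b ∧ ∀ r ∈ l, a ≤ g r := by
  induction l generalizing b with
  | nil => simp
  | cons x xs ih =>
    simp only [List.foldl_cons, ih, le_min_iff, List.mem_cons]
    constructor
    · rintro ⟨⟨h1, h2⟩, h3⟩
      exact ⟨h1, fun x' hx' => hx'.elim (fun e => e ▸ h2) (h3 x')⟩
    · rintro ⟨h1, h2⟩
      exact ⟨⟨h1, h2 x (Or.inl rfl)⟩, fun x' hx' => h2 x' (Or.inr hx')⟩

-- the zip comparison read pointwise
lemma zip_all_le (xs ys : List Int) :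
    ((xs.zip ys).all fun p => decide (p.1 ≤ p.2)) = true ↔
      ∀ (k : ℕ) (h1 : k < xs.length) (h2 : k < ys.length), xs[k] ≤ ys[k] := by
  induction xs generalizing ys with
  | nil => simp
  | cons x xs ih =>
    cases ys with
    | nil => simp
    | cons y ys =>
      simp only [List.zip_cons_cons, List.all_cons, Bool.and_eq_true, decide_eq_true_eq, ih]
      constructor
      · rintro ⟨h0, h⟩ k h1 h2
        cases k with
        | zero => exact h0
        | succ k => exact h k (by simpa using h1) (by simpa using h2)
      · intro h
        exact ⟨h 0 (by simp) (by simp), fun k h1 h2 => h (k+1) (by simpa) (by simpa)⟩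

-- slice r [1:m] read pointwise
lemma tail_take_getD (r : List Int) (Mn k : ℕ) (hk : k < Mn - 1) (hr : Mn ≤ r.length) :
    ((r.drop 1).take (Mn - 1)).getD k 0 = r.getD (k + 1) 0 := by
  have h1 : k < ((r.drop 1).take (Mn - 1)).length := by
    simp only [List.length_take, List.length_drop]; omega
  have h2 : k + 1 < r.length := by omega
  rw [List.getD_eq_getElem _ _ h1, List.getD_eq_getElem _ _ h2,
    List.getElem_take, List.getElem_drop]
  congr 1
  omega

lemma tail_take_length (r : List Int) (Mn : ℕ) (hr : Mn ≤ r.length) :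
    ((r.drop 1).take (Mn - 1)).length = Mn - 1 := by
  simp only [List.length_take, List.length_drop]; omega

theorem is_strictly_dominant_second_spec_aux (u2 : List (List Int)) (s2 : Int)
    (hpre : Pre_is_strictly_dominant_second u2 s2) :
    is_strictly_dominant_second u2 s2 = is_strictly_dominant_second_alt u2 s2 := by
  obtain ⟨hin, hcase⟩ := hpre
  have hne : u2 ≠ [] := by
    intro h; subst h; simp [PySem.Raise.InRange] at hin; omega
  obtain ⟨hd, tl, rfl⟩ : ∃ hd tl, u2 = hd :: tl := by
    cases u2 with
    | nil => exact absurd rfl hne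
    | cons a l => exact ⟨a, l, rfl⟩
  set u2 : List (List Int) := hd :: tl with hu2
  set row := PySem.List.pyGetD u2 s2 [] with hrowdef
  set M : ℕ := row.length with hM
  -- rewrite both ports into explicit closed terms (lets are definitional)
  have hA : is_strictly_dominant_second u2 s2 =
      ((PySem.List.pyRange 0 ((M : Int) - 1) 1).all fun i =>
        (PySem.List.pyRange 0 (u2.length : Int) 1).all fun y =>
          !(decide (PySem.List.pyGetD row i 0 >
                    PySem.List.pyGetD (PySem.List.pyGetD u2 y []) (i + 1) 0))) := rfl
  have hg : ∀ r : List Int, PySem.List.slice r (some 1) (some (M : Int)) =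
      (r.drop 1).take (M - 1) := by
    intro r
    rw [PySem.List.slice_toNat r (by omega) (by omega)]
    norm_num
  have hB : is_strictly_dominant_second_alt u2 s2 =
      ((row.zip ((tl.map fun r => (r.drop 1).take (M - 1)).foldl (List.zipWith min)
          ((hd.drop 1).take (M - 1)))).all fun p => decide (p.1 ≤ p.2)) := by
    show ((row.zip
        ((PySem.List.slice u2 (some 1) none).foldl
          (fun acc r => (acc.zip (PySem.List.slice r (some 1) (some (M : Int)))).map
            fun p => min p.1 p.2)
          (PySem.List.slice (PySem.List.pyGetD u2 0 []) (some 1) (some (M : Int))))).all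
        fun p => decide (p.1 ≤ p.2)) = _
    have hstep : (fun (acc r : List Int) =>
        (acc.zip (PySem.List.slice r (some 1) (some (M : Int)))).map fun p => min p.1 p.2) =
        fun acc r => List.zipWith min acc ((r.drop 1).take (M - 1)) := by
      funext acc r; rw [zip_map_min, hg]
    rw [hstep, hg, PySem.List.slice_from_one]
    have h0 : PySem.List.pyGetD u2 (0 : Int) [] = hd := by
      simp [hu2]
    rw [h0, List.foldl_map]
    rfl
  rw [hA, hB]
  by_cases hM1 : M ≤ 1
  · -- trivial case: no columns to compare on either side
    have hAe : PySem.List.pyRange 0 ((M : Int) - 1) 1 = [] :=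
      PySem.List.pyRange_one_eq_nil (by omega)
    have hacc : ((tl.map fun r => (r.drop 1).take (M - 1)).foldl (List.zipWith min)
        ((hd.drop 1).take (M - 1))).length = 0 := by
      rw [foldl_zipWith_min_length _ _ (by
        intro r _; simp only [List.length_take, List.length_drop]; omega)]
      simp only [List.length_take, List.length_drop]; omega
    rw [hAe, List.eq_nil_of_length_eq_zero hacc]
    simp
  · replace hM1 : 1 < M := by omega
    have hall : ∀ r ∈ u2, M ≤ r.length := by
      rcases hcase with h | h
      · omega
      · exact h
    have hhd : M ≤ hd.length := hall hd (by simp [hu2])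
    have htl : ∀ r ∈ tl, M ≤ r.length := fun r hr => hall r (by simp [hu2, hr])
    have hglen : ∀ r' ∈ tl.map fun r => (r.drop 1).take (M - 1),
        ((hd.drop 1).take (M - 1)).length ≤ r'.length := by
      intro r' hr'
      obtain ⟨r, hr, rfl⟩ := List.mem_map.1 hr'
      rw [tail_take_length _ _ hhd, tail_take_length _ _ (htl r hr)]
    have hacclen : ((tl.map fun r => (r.drop 1).take (M - 1)).foldl (List.zipWith min)
        ((hd.drop 1).take (M - 1))).length = M - 1 := by
      rw [foldl_zipWith_min_length _ _ hglen, tail_take_length _ _ hhd]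
    set acc := (tl.map fun r => (r.drop 1).take (M - 1)).foldl (List.zipWith min)
        ((hd.drop 1).take (M - 1)) with hacc
    have haccget : ∀ k : ℕ, k < M - 1 →
        (acc.getD k 0 = (tl.map fun r => (r.drop 1).take (M - 1)).foldl
          (fun v r => min v (r.getD k 0)) (((hd.drop 1).take (M - 1)).getD k 0)) := by
      intro k hk
      exact foldl_zipWith_min_getD _ _ k hglen (by rw [tail_take_length _ _ hhd]; omega)
    rw [Bool.eq_iff_iff, zip_all_le]
    simp only [List.all_eq_true, Bool.not_eq_eq_eq_not, Bool.not_true,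
      decide_eq_false_iff_not, not_lt]
    constructor
    · -- A → B
      intro hApr k h1 h2
      have hklt : k < M - 1 := by rw [hacclen] at h2; omega
      have key : ∀ r ∈ u2, row.getD k 0 ≤ r.getD (k + 1) 0 := by
        intro r hr
        obtain ⟨y, hy, hgy⟩ := List.mem_iff_getElem.1 hr
        have hA1 := hApr (k : Int) ((PySem.List.mem_pyRange_one).2 ⟨by omega, by
          omega⟩) (y : Int) ((PySem.List.mem_pyRange_one).2 ⟨by omega, by
          exact_mod_cast hy⟩)
        simp only [PySem.List.pyGetD_natCast] at hA1
        have hcast : ((k : Int) + 1) = ((k + 1 : ℕ) : Int) := by omega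
        rw [hcast, PySem.List.pyGetD_natCast] at hA1
        rwa [List.getD_eq_getElem _ _ hy, hgy] at hA1
      rw [show row[k]'h1 = row.getD k 0 from (List.getD_eq_getElem _ _ h1).symm,
        show acc[k]'h2 = acc.getD k 0 from (List.getD_eq_getElem _ _ h2).symm,
        haccget k hklt, le_foldl_min _ (fun r => r.getD k 0), tail_take_getD _ _ _ hklt hhd]
      refine ⟨key hd (by simp [hu2]), ?_⟩
      intro r' hr'
      obtain ⟨r, hr, rfl⟩ := List.mem_map.1 hr'
      rw [tail_take_getD _ _ _ hklt (htl r hr)]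
      exact key r (by simp [hu2, hr])
    · -- B → A
      intro hBpr i hi y hy
      obtain ⟨hi0, hi1⟩ := (PySem.List.mem_pyRange_one).1 hi
      obtain ⟨hy0, hy1⟩ := (PySem.List.mem_pyRange_one).1 hy
      set k : ℕ := i.toNat with hkdef
      have hik : i = (k : Int) := (Int.toNat_of_nonneg hi0).symm
      have hklt : k < M - 1 := by omega
      obtain ⟨yn, rfl⟩ : ∃ n : ℕ, y = (n : Int) := ⟨y.toNat, (Int.toNat_of_nonneg hy0).symm⟩
      have hynlt : yn < u2.length := by exact_mod_cast hy1
      have hb1 : k < row.length := by omega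
      have hb2 : k < acc.length := by rw [hacclen]; omega
      have h1 := hBpr k hb1 hb2
      rw [show row[k]'hb1 = row.getD k 0 from (List.getD_eq_getElem _ _ hb1).symm,
        show acc[k]'hb2 = acc.getD k 0 from (List.getD_eq_getElem _ _ hb2).symm,
        haccget k hklt, le_foldl_min _ (fun r => r.getD k 0), tail_take_getD _ _ _ hklt hhd] at h1
      obtain ⟨hhead, htail⟩ := h1
      rw [hik]
      simp only [PySem.List.pyGetD_natCast]
      have hcast : ((k : Int) + 1) = ((k + 1 : ℕ) : Int) := by omega
      rw [hcast, PySem.List.pyGetD_natCast]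
      cases yn with
      | zero =>
        rw [show u2.getD 0 [] = hd from rfl]
        exact hhead
      | succ j =>
        have hj : j < tl.length := by
          have := hynlt; rw [hu2, List.length_cons] at this; omega
        rw [show u2.getD (j + 1) [] = tl.getD j [] from rfl,
          List.getD_eq_getElem _ _ hj]
        have := htail _ (List.mem_map.2 ⟨tl[j]'hj, List.getElem_mem hj, rfl⟩)
        rwa [tail_take_getD _ _ _ hklt (htl _ (List.getElem_mem hj))] at this

-- ===== VERDICT =====
theorem is_strictly_dominant_second_spec : Claim_equal_is_strictly_dominant_second := by
  intro u2 s2 _ hpre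
  unfold Spec_is_strictly_dominant_second
  exact is_strictly_dominant_second_spec_aux u2 s2 hpre
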